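-- pv_equiv track=rewrite | github.com/HeWeMel/adventofcode | 2021/day20.py | go
-- ===== SOURCE A (Python) =====
-- def go(alg, img, steps):
--     light, dark = "#."
--     for step in range(steps):
--         height, width = len(img), len(img[0])
--         environment = light if alg[0] == "#" and step % 2 == 1 else dark
--
--         new_img = []
--         for yp in range(-1, height+1):
--             x_str = ""
--             for xp in range(-1, width+1):
--                 b = 0
--                 for yd in range(-1, 2):
--                     for xd in range(-1, 2):
--                         y, x = yp + yd, xp + xd
--                         v = img[y][x] if 0 <= x < width and 0 <= y < height else environment
--                         b = b * 2 + (v == light)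
--                 x_str += alg[b]
--             new_img.append(x_str)
--         img = new_img
--
--     lit = sum((img[y][x] == light) for x in range(len(img[0])) for y in range(len(img)))
--     return lit
-- ===== SOURCE B (Python) =====
-- def go(alg, img, steps):
--     # Two-stage (separable) convolution on a 0/1 bit matrix: pad with the
--     # background, sliding-window 3-bit row codes, then combine three row codes
--     # into the 9-bit rule index -- no per-cell 3x3 gather.
--     w = len(img[0])
--     grid = [[1 if ch == "#" else 0 for ch in row[:w]] for row in img]
--     for step in range(steps):
--         bg = 1 if alg[0] == "#" and step % 2 == 1 else 0
--         padded = [[bg] * (w + 4)] * 2 \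
--                + [[bg, bg] + row + [bg, bg] for row in grid] \
--                + [[bg] * (w + 4)] * 2
--         codes = []
--         for prow in padded:
--             acc = 0
--             out = []
--             for bit in prow:
--                 acc = (acc * 2 + bit) % 8
--                 out.append(acc)
--             codes.append(out[2:])
--         grid = [[1 if alg[codes[y - 1][x] * 64 + codes[y][x] * 8 + codes[y + 1][x]] == "#" else 0
--                  for x in range(w + 2)]
--                 for y in range(1, len(padded) - 1)]
--         w += 2
--     return sum(map(sum, grid))
-- ===== Notes on version B (the rewrite author's own statement) =====
-- stated objective: alternative
-- what changed: A rebuilds a dense list-of-strings image each step with a per-cell 3x3 gather (9 indexed reads per cell) and finally rescans the whole grid; B works on a 0/1 bit matrix and replaces the 3x3 gather by a two-stage separable convolution: pad with the background, one sliding-window pass per row producing 3-bit codes, then combine three row codes into the 9-bit rule index, and returns the matrix total.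
import Mathlib
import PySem

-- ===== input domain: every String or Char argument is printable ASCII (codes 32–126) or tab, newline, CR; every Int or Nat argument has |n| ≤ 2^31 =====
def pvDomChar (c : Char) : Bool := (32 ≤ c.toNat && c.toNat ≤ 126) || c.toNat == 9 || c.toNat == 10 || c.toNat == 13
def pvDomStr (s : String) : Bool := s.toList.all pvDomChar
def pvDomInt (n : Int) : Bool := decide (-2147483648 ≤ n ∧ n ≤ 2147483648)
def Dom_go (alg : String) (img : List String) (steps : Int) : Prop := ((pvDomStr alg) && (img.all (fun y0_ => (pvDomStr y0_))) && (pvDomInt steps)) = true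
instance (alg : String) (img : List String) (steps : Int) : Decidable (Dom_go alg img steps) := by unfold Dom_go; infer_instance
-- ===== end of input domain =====

-- B replaces A's per-cell 3x3 gather over a list of strings by a two-stage separable
-- convolution on a 0/1 bit matrix: pad with the background, one sliding-window pass per row
-- producing 3-bit codes, then combine three row codes into the 9-bit rule index
-- (objective: alternative).

-- ===== PORT A =====
-- v = img[y][x] if 0 <= x < width and 0 <= y < height else environment
def goV (img : List String) (height width : Int) (env : Char) (y x : Int) : Char :=
  if 0 ≤ x ∧ x < width ∧ 0 ≤ y ∧ y < height then
    PySem.List.pyGetD (PySem.List.pyGetD img y "").toList x ' '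
  else env

-- the 3×3 loop building the 9-bit index b
def goB (img : List String) (height width : Int) (env : Char) (yp xp : Int) : Int :=
  (PySem.List.pyRange (-1) 2 1).foldl (fun b yd =>
    (PySem.List.pyRange (-1) 2 1).foldl (fun b xd =>
      b * 2 + (if goV img height width env (yp + yd) (xp + xd) = '#' then 1 else 0)) b) 0

-- one enhancement step of A (the body of 'for step in range(steps)')
def goStep (alg : String) (img : List String) (step : Int) : List String :=
  let height : Int := img.length
  let width : Int := (PySem.List.pyGetD img 0 "").toList.length
  let env : Char :=
    if PySem.List.pyGetD alg.toList 0 ' ' = '#' ∧ PySem.Int.mod step 2 = 1 then '#' else '.'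
  (PySem.List.pyRange (-1) (height + 1) 1).foldl (fun acc yp =>
    acc ++ [(PySem.List.pyRange (-1) (width + 1) 1).foldl (fun s xp =>
      s.push (PySem.List.pyGetD alg.toList (goB img height width env yp xp) ' ')) ""]) []

def go (alg : String) (img : List String) (steps : Int) : Int :=
  let fin := (PySem.List.pyRange 0 steps 1).foldl (goStep alg) img
  (PySem.List.pyRange 0 ((PySem.List.pyGetD fin 0 "").toList.length : Int) 1).foldl (fun acc x =>
    (PySem.List.pyRange 0 (fin.length : Int) 1).foldl (fun acc y =>
      acc + (if PySem.List.pyGetD (PySem.List.pyGetD fin y "").toList x ' ' = '#' then 1 else 0))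
      acc) 0

-- ===== PORT B =====
-- per-row sliding 3-bit window: acc = (acc*2+bit) % 8, collect, then out[2:] (= drop 2, exact)
def bScan (prow : List Int) : List Int :=
  ((prow.foldl (fun (s : Int × List Int) bit =>
      let a := PySem.Int.mod (s.1 * 2 + bit) 8
      (a, s.2 ++ [a])) (0, [])).2).drop 2

-- padded = [[bg]*(w+4)]*2 + [[bg,bg]+row+[bg,bg] for row in grid] + [[bg]*(w+4)]*2
def bPad (bg w : Int) (grid : List (List Int)) : List (List Int) :=
  List.replicate 2 (List.replicate (w + 4).toNat bg)
    ++ grid.map (fun row => [bg, bg] ++ row ++ [bg, bg])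
    ++ List.replicate 2 (List.replicate (w + 4).toNat bg)

-- one enhancement step of B, state (grid, w)
def bStep (alg : String) (st : List (List Int) × Int) (step : Int) : List (List Int) × Int :=
  let bg : Int :=
    if PySem.List.pyGetD alg.toList 0 ' ' = '#' ∧ PySem.Int.mod step 2 = 1 then 1 else 0
  let padded := bPad bg st.2 st.1
  let codes := padded.map bScan
  ((PySem.List.pyRange 1 ((padded.length : Int) - 1) 1).map (fun y =>
    (PySem.List.pyRange 0 (st.2 + 2) 1).map (fun x =>
      if PySem.List.pyGetD alg.toList
          (PySem.List.pyGetD (PySem.List.pyGetD codes (y - 1) []) x 0 * 64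
            + PySem.List.pyGetD (PySem.List.pyGetD codes y []) x 0 * 8
            + PySem.List.pyGetD (PySem.List.pyGetD codes (y + 1) []) x 0) ' ' = '#'
      then (1 : Int) else 0)),
   st.2 + 2)

def go_alt (alg : String) (img : List String) (steps : Int) : Int :=
  let w0 : Int := ((PySem.List.pyGetD img 0 "").toList.length : Int)
  let init : List (List Int) := img.map (fun row =>
    (PySem.List.slice row.toList none (some w0)).map (fun ch => if ch = '#' then (1 : Int) else 0))
  let st := (PySem.List.pyRange 0 steps 1).foldl (bStep alg) (init, w0)
  (st.1.map List.sum).sum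

-- ===== PRECONDITION & SPEC =====
-- Pre_ excludes the inputs where A raises: an empty image or a row shorter than the first row
-- (IndexError on img[y][x]), and steps ≥ 1 with alg shorter than the full 512-entry table
-- (IndexError on alg[b]) — except for the all-dark image with a dark rule entry 0, where A
-- provably only ever reads alg[0] and so returns with any non-empty alg.
def Pre_go (alg : String) (img : List String) (steps : Int) : Prop :=
  img ≠ [] ∧ (∀ r ∈ img, (img.headD "").toList.length ≤ r.toList.length) ∧
    (steps ≤ 0 ∨ 512 ≤ alg.toList.length ∨
      (1 ≤ alg.toList.length ∧ alg.toList.headD ' ' ≠ '#' ∧ ∀ r ∈ img, '#' ∉ r.toList))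
instance (alg : String) (img : List String) (steps : Int) : Decidable (Pre_go alg img steps) := by
  unfold Pre_go; infer_instance

def pvWitness_go : String × List String × Int := ("", ["#"], 0)

def Spec_go (alg : String) (img : List String) (steps : Int) (out : Int) : Prop :=
  out = go_alt alg img steps
instance (alg : String) (img : List String) (steps : Int) (out : Int) :
    Decidable (Spec_go alg img steps out) := by unfold Spec_go; infer_instance

-- ===== CLAIM (what is proved, stated in full; the proofs are below) =====
def Claim_equal_go : Prop := ∀ (alg : String) (img : List String) (steps : Int),
  Dom_go alg img steps → Pre_go alg img steps → Spec_go alg img steps (go alg img steps)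

-- ===== LEMMAS AND PROOFS =====

-- proof helpers
def cellAt (img : List String) (y x : Int) : Char :=
  PySem.List.pyGetD (PySem.List.pyGetD img y "").toList x ' '

def wdI (img : List String) : Int := ((PySem.List.pyGetD img 0 "").toList.length : Int)

def envC (alg : String) (k : Int) : Char :=
  if PySem.List.pyGetD alg.toList 0 ' ' = '#' ∧ PySem.Int.mod k 2 = 1 then '#' else '.'

def bgOf (alg : String) (k : Int) : Int :=
  if PySem.List.pyGetD alg.toList 0 ' ' = '#' ∧ PySem.Int.mod k 2 = 1 then 1 else 0

-- the canonical bit matrix of an image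
def gridOf (img : List String) : List (List Int) :=
  (PySem.List.pyRange 0 (img.length : Int) 1).map (fun y =>
    (PySem.List.pyRange 0 (wdI img) 1).map (fun x =>
      if cellAt img y x = '#' then (1 : Int) else 0))

-- scanList a l = the list of accumulator values of B's per-row sliding pass
def scanList (a : Int) : List Int → List Int
  | [] => []
  | b :: t => PySem.Int.mod (a * 2 + b) 8 :: scanList (PySem.Int.mod (a * 2 + b) 8) t

theorem bScan_foldl (l : List Int) : ∀ (a : Int) (o : List Int),
    (l.foldl (fun (s : Int × List Int) bit =>
      let v := PySem.Int.mod (s.1 * 2 + bit) 8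
      (v, s.2 ++ [v])) (a, o)).2 = o ++ scanList a l := by
  induction l with
  | nil => intro a o; simp [scanList]
  | cons b t ih =>
    intro a o
    rw [List.foldl_cons]
    exact (ih (PySem.Int.mod (a * 2 + b) 8) (o ++ [PySem.Int.mod (a * 2 + b) 8])).trans
      (by simp [scanList])

theorem bScan_eq (l : List Int) : bScan l = (scanList 0 l).drop 2 := by
  unfold bScan; rw [bScan_foldl l 0 []]; rfl

theorem length_scanList (a : Int) (l : List Int) : (scanList a l).length = l.length := by
  induction l generalizing a with
  | nil => rfl
  | cons b t ih => simp [scanList, ih]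

theorem scanList_getElem (l : List Int) : ∀ (a : Int) (i : Nat) (h : i < l.length),
    (scanList a l)[i]'(by rw [length_scanList]; exact h) =
      (l.take (i + 1)).foldl (fun c b => PySem.Int.mod (c * 2 + b) 8) a := by
  induction l with
  | nil => intro a i h; exact absurd h (by simp)
  | cons b t ih =>
    intro a i h
    cases i with
    | zero => simp [scanList]
    | succ j =>
      have hj : j < t.length := by simpa using h
      simpa [scanList, List.take_succ_cons] using ih (PySem.Int.mod (a * 2 + b) 8) j hj

theorem mod8_window (A x y z : Int) (hx : x = 0 ∨ x = 1) (hy : y = 0 ∨ y = 1)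
    (hz : z = 0 ∨ z = 1) :
    PySem.Int.mod (PySem.Int.mod (PySem.Int.mod (A * 2 + x) 8 * 2 + y) 8 * 2 + z) 8 =
      4 * x + 2 * y + z := by
  simp only [PySem.Int.mod_eq_emod_of_pos (by norm_num : (0:Int) < 8)]
  rcases hx with rfl | rfl <;> rcases hy with rfl | rfl <;> rcases hz with rfl | rfl <;> omega

-- the sliding pass over a bit list computes the 3-bit windows
theorem scanList_window (l : List Int) (hl : ∀ b ∈ l, b = 0 ∨ b = 1) (i : Nat)
    (h : i + 2 < l.length) :
    (scanList 0 l)[i + 2]'(by rw [length_scanList]; exact h) =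
      4 * l[i]'(by omega) + 2 * l[i + 1]'(by omega) + l[i + 2]'h := by
  rw [scanList_getElem l 0 (i + 2) h]
  have hsplit : l.take (i + 2 + 1) =
      l.take i ++ [l[i]'(by omega), l[i + 1]'(by omega), l[i + 2]'h] := by
    rw [show i + 2 + 1 = i + 3 from rfl, List.take_add]
    congr 1
    rw [List.drop_eq_getElem_cons (by omega : i < l.length), List.take_succ_cons,
      List.drop_eq_getElem_cons (by omega : i + 1 < l.length), List.take_succ_cons,
      List.drop_eq_getElem_cons (by omega : i + 2 < l.length), List.take_succ_cons,
      List.take_zero]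
  rw [hsplit, List.foldl_append]
  simp only [List.foldl_cons, List.foldl_nil]
  exact mod8_window _ _ _ _ (hl _ (List.getElem_mem _)) (hl _ (List.getElem_mem _))
    (hl _ (List.getElem_mem _))

theorem pyGetD_map_pyRange_int {β : Type} (f : Int → β) (a b : Int) (i : Int) (d : β)
    (h0 : 0 ≤ i) (h1 : i < b - a) :
    PySem.List.pyGetD ((PySem.List.pyRange a b 1).map f) i d = f (a + i) := by
  have hk : i = ((i.toNat : Nat) : Int) := (Int.toNat_of_nonneg h0).symm
  rw [hk, PySem.List.pyGetD_map_pyRange_one f a b i.toNat d (by omega)]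

-- A's step: shape and cells
theorem foldl_push_toList (l : List Int) (f : Int → Char) (s : String) :
    (l.foldl (fun s xp => s.push (f xp)) s).toList = s.toList ++ l.map f := by
  induction l generalizing s with
  | nil => simp
  | cons a l ih => simp [List.foldl, ih]

theorem goStep_eq_map (alg : String) (img : List String) (k : Int) :
    goStep alg img k = (PySem.List.pyRange (-1) ((img.length : Int) + 1) 1).map (fun yp =>
      String.ofList ((PySem.List.pyRange (-1) (wdI img + 1) 1).map (fun xp =>
        PySem.List.pyGetD alg.toList (goB img (img.length : Int) (wdI img) (envC alg k) yp xp) ' '))) := by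
  unfold goStep wdI envC
  simp only [PySem.List.foldl_append_singleton_eq_map, List.nil_append]
  refine List.map_congr_left ?_
  intro yp _
  apply String.toList_inj.mp
  rw [foldl_push_toList]
  simp

theorem length_goStep (alg : String) (img : List String) (k : Int) :
    ((goStep alg img k).length : Int) = (img.length : Int) + 2 := by
  rw [goStep_eq_map, List.length_map, PySem.List.length_pyRange_one]
  omega

theorem wdI_goStep (alg : String) (img : List String) (k : Int) :
    wdI (goStep alg img k) = wdI img + 2 := by
  unfold wdI
  rw [goStep_eq_map, pyGetD_map_pyRange_int _ _ _ _ _ (le_refl 0) (by omega)]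
  rw [String.toList_ofList, List.length_map, PySem.List.length_pyRange_one]
  unfold wdI
  omega

theorem cellAt_goStep (alg : String) (img : List String) (k : Int) (Y X : Int)
    (hY0 : 0 ≤ Y) (hY1 : Y < (img.length : Int) + 2) (hX0 : 0 ≤ X) (hX1 : X < wdI img + 2) :
    cellAt (goStep alg img k) Y X =
      PySem.List.pyGetD alg.toList
        (goB img (img.length : Int) (wdI img) (envC alg k) (Y - 1) (X - 1)) ' ' := by
  unfold cellAt
  rw [goStep_eq_map, pyGetD_map_pyRange_int _ _ _ _ _ hY0 (by omega)]
  rw [String.toList_ofList, pyGetD_map_pyRange_int _ _ _ _ _ hX0 (by omega)]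
  have e1 : -1 + Y = Y - 1 := by ring
  have e2 : -1 + X = X - 1 := by ring
  rw [e1, e2]

-- closed form of A's 3×3 index
theorem goB_closed (img : List String) (h w : Int) (env : Char) (yp xp : Int) :
    goB img h w env yp xp =
      256 * (if goV img h w env (yp - 1) (xp - 1) = '#' then 1 else 0)
      + 128 * (if goV img h w env (yp - 1) xp = '#' then 1 else 0)
      + 64 * (if goV img h w env (yp - 1) (xp + 1) = '#' then 1 else 0)
      + 32 * (if goV img h w env yp (xp - 1) = '#' then 1 else 0)
      + 16 * (if goV img h w env yp xp = '#' then 1 else 0)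
      + 8 * (if goV img h w env yp (xp + 1) = '#' then 1 else 0)
      + 4 * (if goV img h w env (yp + 1) (xp - 1) = '#' then 1 else 0)
      + 2 * (if goV img h w env (yp + 1) xp = '#' then 1 else 0)
      + (if goV img h w env (yp + 1) (xp + 1) = '#' then 1 else 0) := by
  unfold goB
  rw [show PySem.List.pyRange (-1) 2 1 = [-1, 0, 1] from by decide]
  simp only [List.foldl_cons, List.foldl_nil,
    show ∀ t : Int, t + -1 = t - 1 from fun t => by ring,
    show ∀ t : Int, t + 0 = t from fun t => by ring]
  ring

-- bit-valuedness
theorem bgOf_bits (alg : String) (k : Int) : bgOf alg k = 0 ∨ bgOf alg k = 1 := by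
  unfold bgOf; split_ifs <;> simp

-- the padded row seen through pyGetD
def padRow (alg : String) (img : List String) (k : Int) (py : Int) : List Int :=
  PySem.List.pyGetD (bPad (bgOf alg k) (wdI img) (gridOf img)) py []

theorem length_bPad (bg w : Int) (g : List (List Int)) :
    (bPad bg w g).length = g.length + 4 := by
  simp only [bPad, List.length_append, List.length_replicate, List.length_map]; omega

theorem length_gridOf (img : List String) : (gridOf img).length = img.length := by
  simp [gridOf, PySem.List.length_pyRange_one]

theorem wdI_nonneg (img : List String) : 0 ≤ wdI img := by
  unfold wdI; positivity

theorem padRow_eq (alg : String) (img : List String) (k : Int) (py : Int)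
    (h0 : 0 ≤ py) (h1 : py < (img.length : Int) + 4) :
    padRow alg img k py =
      if py < 2 ∨ (img.length : Int) + 2 ≤ py then
        List.replicate (wdI img + 4).toNat (bgOf alg k)
      else [bgOf alg k, bgOf alg k] ++
        ((PySem.List.pyRange 0 (wdI img) 1).map (fun x =>
          if cellAt img (py - 2) x = '#' then (1 : Int) else 0)) ++ [bgOf alg k, bgOf alg k] := by
  have hg := length_gridOf img
  unfold padRow
  rw [PySem.List.pyGetD_eq_getElem _ _ h0 (by rw [length_bPad, length_gridOf]; omega)]
  unfold bPad
  by_cases hlt : py < 2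
  · rw [if_pos (Or.inl hlt)]
    rw [List.getElem_append_left (by
      simp only [List.length_append, List.length_replicate, List.length_map]; omega)]
    rw [List.getElem_append_left (by simp only [List.length_replicate]; omega)]
    exact List.getElem_replicate ..
  · by_cases hge : (img.length : Int) + 2 ≤ py
    · rw [if_pos (Or.inr hge)]
      rw [List.getElem_append_right (by
        simp only [List.length_append, List.length_replicate, List.length_map]; omega)]
      exact List.getElem_replicate ..
    · rw [if_neg (by omega)]
      rw [List.getElem_append_left (by
        simp only [List.length_append, List.length_replicate, List.length_map]; omega)]
      rw [List.getElem_append_right (by simp only [List.length_replicate]; omega)]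
      have hmid : ∀ (hm : py.toNat - 2 < (gridOf img).length),
          (gridOf img)[py.toNat - 2]'hm =
          (PySem.List.pyRange 0 (wdI img) 1).map (fun x =>
            if cellAt img (py - 2) x = '#' then (1 : Int) else 0) := by
        intro hm
        unfold gridOf
        rw [List.getElem_map, PySem.List.getElem_pyRange_one]
        have harg : (0 : Int) + ((py.toNat - 2 : Nat) : Int) = py - 2 := by omega
        rw [harg]
      simp only [List.length_replicate]
      rw [List.getElem_map]
      rw [hmid]

theorem length_padRow (alg : String) (img : List String) (k : Int) (py : Int)
    (h0 : 0 ≤ py) (h1 : py < (img.length : Int) + 4) :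
    (padRow alg img k py).length = (wdI img + 4).toNat := by
  have hw := wdI_nonneg img
  rw [padRow_eq alg img k py h0 h1]
  split_ifs with hc
  · simp
  · simp [PySem.List.length_pyRange_one]; omega

theorem padRow_bits (alg : String) (img : List String) (k : Int) (py : Int)
    (h0 : 0 ≤ py) (h1 : py < (img.length : Int) + 4) :
    ∀ v ∈ padRow alg img k py, v = 0 ∨ v = 1 := by
  intro v hv
  rw [padRow_eq alg img k py h0 h1] at hv
  split_ifs at hv with hc
  · exact (List.eq_of_mem_replicate hv) ▸ bgOf_bits alg k
  · rcases List.mem_append.mp hv with hv | hv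
    · rcases List.mem_append.mp hv with hv | hv
      · have : v = bgOf alg k := by simpa using hv
        exact this ▸ bgOf_bits alg k
      · obtain ⟨x, -, rfl⟩ := List.mem_map.mp hv
        split_ifs <;> simp
    · have : v = bgOf alg k := by simpa using hv
      exact this ▸ bgOf_bits alg k

-- the padded matrix entry is A's neighbourhood value goV
theorem padRow_entry (alg : String) (img : List String) (k : Int) (py j : Int)
    (hpy0 : 0 ≤ py) (hpy1 : py < (img.length : Int) + 4)
    (hj0 : 0 ≤ j) (hj1 : j < wdI img + 4) :
    PySem.List.pyGetD (padRow alg img k py) j 0 =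
      if goV img (img.length : Int) (wdI img) (envC alg k) (py - 2) (j - 2) = '#' then 1
      else 0 := by
  have hw := wdI_nonneg img
  have hbg : ∀ (henv : ¬(0 ≤ j - 2 ∧ j - 2 < wdI img ∧ 0 ≤ py - 2 ∧
      py - 2 < (img.length : Int))), (bgOf alg k) =
      if goV img (img.length : Int) (wdI img) (envC alg k) (py - 2) (j - 2) = '#' then 1
      else 0 := by
    intro henv
    unfold goV
    rw [if_neg henv]
    unfold envC bgOf
    split_ifs with hc h2 <;> simp_all
  rw [padRow_eq alg img k py hpy0 hpy1]
  by_cases hc : py < 2 ∨ (img.length : Int) + 2 ≤ py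
  · rw [if_pos hc]
    rw [PySem.List.pyGetD_eq_getElem _ _ hj0 (by simp only [List.length_replicate]; omega),
      List.getElem_replicate]
    exact hbg (by omega)
  · rw [if_neg hc]
    rw [PySem.List.pyGetD_eq_getElem _ _ hj0 (by
      simp only [List.length_append, List.length_map, PySem.List.length_pyRange_one,
        List.length_cons, List.length_nil]; omega)]
    by_cases hj2 : j < 2
    · rw [List.getElem_append_left (by
        simp only [List.length_append, List.length_map, PySem.List.length_pyRange_one,
          List.length_cons, List.length_nil]; omega)]
      rw [List.getElem_append_left (by
        simp only [List.length_cons, List.length_nil]; omega)]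
      have hcase : (j.toNat = 0 ∨ j.toNat = 1) := by omega
      have hval : ∀ (m : Nat) (hm : m < 2),
          ([bgOf alg k, bgOf alg k][m]'(by simpa using hm)) = bgOf alg k := by
        intro m hm; interval_cases m <;> rfl
      rw [hval _ (by omega)]
      exact hbg (by omega)
    · by_cases hj3 : j < wdI img + 2
      · rw [List.getElem_append_left (by
          simp only [List.length_append, List.length_map, PySem.List.length_pyRange_one,
            List.length_cons, List.length_nil]; omega)]
        rw [List.getElem_append_right (by
          simp only [List.length_cons, List.length_nil]; omega)]
        rw [List.getElem_map, PySem.List.getElem_pyRange_one]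
        have harg : (0 : Int) + ((j.toNat - [bgOf alg k, bgOf alg k].length : Nat) : Int) =
            j - 2 := by
          simp only [List.length_cons, List.length_nil]; omega
        rw [harg]
        have hgv : goV img (img.length : Int) (wdI img) (envC alg k) (py - 2) (j - 2) =
            cellAt img (py - 2) (j - 2) := by
          unfold goV cellAt
          rw [if_pos (by omega)]
        rw [hgv]
      · rw [List.getElem_append_right (by
          simp only [List.length_append, List.length_map, PySem.List.length_pyRange_one,
            List.length_cons, List.length_nil]; omega)]
        have hval : ∀ (m : Nat) (hm : m < 2),
            ([bgOf alg k, bgOf alg k][m]'(by simpa using hm)) = bgOf alg k := by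
          intro m hm; interval_cases m <;> rfl
        rw [hval _ (by
          simp only [List.length_append, List.length_map, PySem.List.length_pyRange_one,
            List.length_cons, List.length_nil]; omega)]
        exact hbg (by omega)

theorem padRow_entry' (alg : String) (img : List String) (k : Int) (py : Int) (j : Nat)
    (hpy0 : 0 ≤ py) (hpy1 : py < (img.length : Int) + 4) (hj : (j : Int) < wdI img + 4)
    (hlen : j < (padRow alg img k py).length) :
    (padRow alg img k py)[j]'hlen =
      if goV img (img.length : Int) (wdI img) (envC alg k) (py - 2) ((j : Int) - 2) = '#' then 1
      else 0 := by
  have := padRow_entry alg img k py (j : Int) hpy0 hpy1 (by positivity) hj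
  rw [PySem.List.pyGetD_eq_getElem _ _ (by positivity) (by simpa using hlen)] at this
  simpa using this

-- one entry of B's codes matrix, as three neighbourhood values
theorem codes_entry (alg : String) (img : List String) (k : Int) (py X : Int)
    (hpy0 : 0 ≤ py) (hpy1 : py < (img.length : Int) + 4)
    (hX0 : 0 ≤ X) (hX1 : X < wdI img + 2) :
    PySem.List.pyGetD
      (PySem.List.pyGetD ((bPad (bgOf alg k) (wdI img) (gridOf img)).map bScan) py []) X 0 =
      4 * (if goV img (img.length : Int) (wdI img) (envC alg k) (py - 2) (X - 2) = '#' then 1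
            else 0)
      + 2 * (if goV img (img.length : Int) (wdI img) (envC alg k) (py - 2) (X - 1) = '#' then 1
            else 0)
      + (if goV img (img.length : Int) (wdI img) (envC alg k) (py - 2) X = '#' then 1
            else 0) := by
  have hw := wdI_nonneg img
  have hg := length_gridOf img
  rw [PySem.List.pyGetD_eq_getElem _ _ hpy0 (by
    rw [List.length_map, length_bPad, hg]; omega)]
  rw [List.getElem_map]
  have hrow : (bPad (bgOf alg k) (wdI img) (gridOf img))[py.toNat]'(by
      rw [length_bPad, hg]; omega) = padRow alg img k py := by
    unfold padRow
    rw [PySem.List.pyGetD_eq_getElem _ _ hpy0 (by rw [length_bPad, hg]; omega)]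
  rw [hrow, bScan_eq]
  have hlr := length_padRow alg img k py hpy0 hpy1
  rw [PySem.List.pyGetD_eq_getElem _ _ hX0 (by
    rw [List.length_drop, length_scanList]; omega)]
  rw [List.getElem_drop]
  have hexp : 2 + X.toNat = X.toNat + 2 := by omega
  simp only [hexp]
  rw [scanList_window (padRow alg img k py) (padRow_bits alg img k py hpy0 hpy1) X.toNat
    (by omega)]
  rw [padRow_entry' alg img k py X.toNat hpy0 hpy1 (by omega) (by omega),
    padRow_entry' alg img k py (X.toNat + 1) hpy0 hpy1 (by push_cast; omega) (by omega),
    padRow_entry' alg img k py (X.toNat + 2) hpy0 hpy1 (by push_cast; omega) (by omega)]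
  have c1 : ((X.toNat : Nat) : Int) - 2 = X - 2 := by omega
  have c2 : ((X.toNat + 1 : Nat) : Int) - 2 = X - 1 := by push_cast; omega
  have c3 : ((X.toNat + 2 : Nat) : Int) - 2 = X := by push_cast; omega
  rw [c1, c2, c3]

-- B's combined rule index is A's 9-bit index
theorem bIndex_eq (alg : String) (img : List String) (k : Int) (Y X : Int)
    (hY0 : 0 ≤ Y) (hY1 : Y < (img.length : Int) + 2)
    (hX0 : 0 ≤ X) (hX1 : X < wdI img + 2) :
    PySem.List.pyGetD
        (PySem.List.pyGetD ((bPad (bgOf alg k) (wdI img) (gridOf img)).map bScan) Y []) X 0 * 64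
      + PySem.List.pyGetD
        (PySem.List.pyGetD ((bPad (bgOf alg k) (wdI img) (gridOf img)).map bScan) (Y + 1) []) X 0
          * 8
      + PySem.List.pyGetD
        (PySem.List.pyGetD ((bPad (bgOf alg k) (wdI img) (gridOf img)).map bScan) (Y + 2) []) X 0
      = goB img (img.length : Int) (wdI img) (envC alg k) (Y - 1) (X - 1) := by
  rw [codes_entry alg img k Y X hY0 (by omega) hX0 hX1,
    codes_entry alg img k (Y + 1) X (by omega) (by omega) hX0 hX1,
    codes_entry alg img k (Y + 2) X (by omega) (by omega) hX0 hX1,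
    goB_closed]
  simp only [show ∀ t : Int, t - 1 - 1 = t - 2 from fun t => by ring,
    show ∀ t : Int, t - 1 + 1 = t from fun t => by ring,
    show ∀ t : Int, t + 1 - 2 = t - 1 from fun t => by ring,
    show ∀ t : Int, t + 2 - 2 = t from fun t => by ring]
  ring

theorem gridOf_row (img : List String) (Y : Nat) (hY : Y < (gridOf img).length) :
    (gridOf img)[Y]'hY = (PySem.List.pyRange 0 (wdI img) 1).map (fun x =>
      if cellAt img (Y : Int) x = '#' then (1 : Int) else 0) := by
  unfold gridOf
  rw [List.getElem_map, PySem.List.getElem_pyRange_one]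
  simp

-- B's step preserves the canonical bit matrix of A's image
set_option maxHeartbeats 2000000 in
theorem bStep_gridOf (alg : String) (img : List String) (k : Int) :
    bStep alg (gridOf img, wdI img) k = (gridOf (goStep alg img k), wdI img + 2) := by
  have hw := wdI_nonneg img
  have hg := length_gridOf img
  have hlg := length_goStep alg img k
  have hwg := wdI_goStep alg img k
  simp only [bStep]
  rw [show (if PySem.List.pyGetD alg.toList 0 ' ' = '#' ∧ PySem.Int.mod k 2 = 1 then (1 : Int)
      else 0) = bgOf alg k from rfl]
  refine Prod.ext ?_ rfl
  simp only
  apply List.ext_getElem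
  · rw [List.length_map, PySem.List.length_pyRange_one, length_bPad, hg, length_gridOf]
    omega
  · intro Y hY1 hY2
    rw [List.getElem_map, PySem.List.getElem_pyRange_one]
    rw [gridOf_row (goStep alg img k) Y hY2]
    have hYr : (Y : Int) < (img.length : Int) + 2 := by
      rw [length_gridOf] at hY2; omega
    apply List.ext_getElem
    · rw [List.length_map, List.length_map, PySem.List.length_pyRange_one,
        PySem.List.length_pyRange_one, hwg]
    · intro X hX1 hX2
      rw [List.getElem_map, List.getElem_map, PySem.List.getElem_pyRange_one,
        PySem.List.getElem_pyRange_one]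
      have hXr : (X : Int) < wdI img + 2 := by
        rw [List.length_map, PySem.List.length_pyRange_one] at hX1; omega
      simp only [zero_add, show ∀ t : Int, 1 + t = t + 1 from fun t => by ring]
      simp only [show ∀ t : Int, t + 1 - 1 = t from fun t => by ring,
        show ∀ t : Int, t + 1 + 1 = t + 2 from fun t => by ring]
      have hbi := bIndex_eq alg img k (Y : Int) (X : Int) (Int.natCast_nonneg Y) hYr
        (Int.natCast_nonneg X) hXr
      have hca := cellAt_goStep alg img k (Y : Int) (X : Int) (Int.natCast_nonneg Y) hYr
        (Int.natCast_nonneg X) hXr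
      rw [hbi, hca]

-- the initial bit matrix (rows clipped to the first row's width) is the canonical one
theorem init_gridOf (img : List String)
    (hrows : ∀ r ∈ img, (img.headD "").toList.length ≤ r.toList.length) :
    img.map (fun row =>
      (PySem.List.slice row.toList none
          (some ((PySem.List.pyGetD img 0 "").toList.length : Int))).map
        (fun ch => if ch = '#' then (1 : Int) else 0)) = gridOf img := by
  apply List.ext_getElem
  · rw [List.length_map, length_gridOf]
  · intro y hy1 hy2
    rw [List.getElem_map, gridOf_row img y hy2]
    rw [PySem.List.slice_to _ (by positivity)]
    have hy1' : y < img.length := by rw [List.length_map] at hy1; exact hy1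
    have hhead : PySem.List.pyGetD img 0 "" = img.headD "" := by
      cases img with
      | nil => simp at hy1'
      | cons a l => rw [PySem.List.pyGetD_zero_cons]; rfl
    have hwh : (PySem.List.pyGetD img 0 "").toList.length =
        (img.headD "").toList.length := by rw [hhead]
    have hr := hrows (img[y]'hy1') (List.getElem_mem _)
    apply List.ext_getElem
    · simp only [List.length_map, List.length_take, PySem.List.length_pyRange_one, wdI]
      omega
    · intro j hj1 hj2
      have hjw : (j : Int) < ((PySem.List.pyGetD img 0 "").toList.length : Int) := by
        rw [List.length_map, List.length_take] at hj1; omega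
      simp only [List.getElem_map, List.getElem_take, PySem.List.getElem_pyRange_one, zero_add]
      have hcell : cellAt img ((y : Nat) : Int) ((j : Nat) : Int) =
          (img[y]'hy1').toList[j]'(by omega) := by
        unfold cellAt
        rw [PySem.List.pyGetD_eq_getElem img "" (by positivity) (by exact_mod_cast hy1')]
        simp only [Int.toNat_natCast]
        rw [PySem.List.pyGetD_eq_getElem _ ' ' (by positivity) (by omega)]
        simp only [Int.toNat_natCast]
      rw [hcell]

-- exchanging the two summation orders of a 0/1 matrix
theorem sum_swap_int (l1 l2 : List Int) (f : Int → Int → Int) :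
    (l1.map (fun x => (l2.map (fun y => f x y)).sum)).sum
      = (l2.map (fun y => (l1.map (fun x => f x y)).sum)).sum := by
  induction l1 with
  | nil => simp
  | cons a t ih =>
    simp only [List.map_cons, List.sum_cons, ih]
    rw [PySem.List.sum_map_add_int]

-- A's final double count is the total of the canonical bit matrix
theorem count_eq (fin : List String) :
    (PySem.List.pyRange 0 ((PySem.List.pyGetD fin 0 "").toList.length : Int) 1).foldl
      (fun acc x => (PySem.List.pyRange 0 (fin.length : Int) 1).foldl (fun acc y =>
        acc + (if PySem.List.pyGetD (PySem.List.pyGetD fin y "").toList x ' ' = '#' then 1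
          else 0)) acc) 0 = ((gridOf fin).map List.sum).sum := by
  simp only [PySem.List.foldl_add, zero_add]
  rw [sum_swap_int]
  unfold gridOf cellAt wdI
  rw [List.map_map]
  rfl

-- the A-side loop state after n steps
def stA (alg : String) (img : List String) (n : Nat) : List String :=
  (PySem.List.pyRange 0 (n : Int) 1).foldl (goStep alg) img

theorem stA_zero (alg : String) (img : List String) : stA alg img 0 = img := by
  unfold stA
  rw [show PySem.List.pyRange 0 ((0 : Nat) : Int) 1 = [] from
    PySem.List.pyRange_one_eq_nil (by simp)]
  rfl

theorem stA_succ (alg : String) (img : List String) (n : Nat) :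
    stA alg img (n + 1) = goStep alg (stA alg img n) ((n : Nat) : Int) := by
  unfold stA
  rw [show PySem.List.pyRange 0 (((n + 1 : Nat)) : Int) 1 =
      PySem.List.pyRange 0 ((n : Nat) : Int) 1 ++ [((n : Nat) : Int)] from by
    push_cast
    exact PySem.List.pyRange_one_succ_right (by positivity), List.foldl_append]
  rfl

-- the B-side loop tracks the canonical bit matrix of the A-side loop
theorem stB_eq (alg : String) (img : List String) (n : Nat) :
    (PySem.List.pyRange 0 (n : Int) 1).foldl (bStep alg) (gridOf img, wdI img)
      = (gridOf (stA alg img n), wdI (stA alg img n)) := by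
  induction n with
  | zero =>
    rw [show PySem.List.pyRange 0 ((0 : Nat) : Int) 1 = [] from
      PySem.List.pyRange_one_eq_nil (by simp), List.foldl_nil, stA_zero]
  | succ n ih =>
    rw [show PySem.List.pyRange 0 (((n + 1 : Nat)) : Int) 1 =
        PySem.List.pyRange 0 ((n : Nat) : Int) 1 ++ [((n : Nat) : Int)] from by
      push_cast
      exact PySem.List.pyRange_one_succ_right (by positivity), List.foldl_append]
    rw [ih, List.foldl_cons, List.foldl_nil, bStep_gridOf, stA_succ]
    rw [wdI_goStep]

theorem pyRange_toNat' (s : Int) :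
    PySem.List.pyRange 0 s 1 = PySem.List.pyRange 0 ((s.toNat : Nat) : Int) 1 := by
  by_cases h : 0 ≤ s
  · rw [Int.toNat_of_nonneg h]
  · rw [PySem.List.pyRange_one_eq_nil (by omega), PySem.List.pyRange_one_eq_nil (by omega)]

-- ===== VERDICT =====
theorem go_spec : Claim_equal_go := by
  intro alg img steps _hDom hPre
  obtain ⟨hne, hrows, -⟩ := hPre
  unfold Spec_go
  show go alg img steps = go_alt alg img steps
  simp only [go, go_alt]
  rw [pyRange_toNat' steps]
  rw [init_gridOf img hrows]
  rw [show ((PySem.List.pyGetD img 0 "").toList.length : Int) = wdI img from rfl]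
  rw [stB_eq alg img steps.toNat]
  rw [count_eq]
  rfl
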